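-- pv_equiv track=rewrite | github.com/jackclayton247/puzzels | temp/Tri-Tri-Again.py | factor_tree
-- ===== SOURCE A (Python) =====
-- def factor_tree(number):
--     factors = [] #creates list to hold factors
--     for x in range(1,number+1, 1): #iterates through all integers from 1 to number
--         if x in (1, number): #excludes factors of 1 and itself
--             pass
--         elif number % x == 0: #checks if number is divisible cleanly by current x
--             factors.append(x) #adds x value to factors list
--     return factors
-- ===== SOURCE B (Python) =====
-- def factor_tree(number):
--     small = []
--     large = []
--     d = 2
--     while d * d <= number:
--         if number % d == 0:
--             small.append(d)
--             q = number // d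
--             if q != d:
--                 large.append(q)
--         d += 1
--     return small + large[::-1]
-- ===== Notes on version B (the rewrite author's own statement) =====
-- stated objective: faster
-- what changed: Replaced A's linear scan over 1..n (testing every x for divisibility) by trial division up to sqrt(n) that collects each divisor pair (d, n//d) into two lists and concatenates the small divisors with the reversed cofactors, avoiding any scan beyond sqrt(n).
import Mathlib
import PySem

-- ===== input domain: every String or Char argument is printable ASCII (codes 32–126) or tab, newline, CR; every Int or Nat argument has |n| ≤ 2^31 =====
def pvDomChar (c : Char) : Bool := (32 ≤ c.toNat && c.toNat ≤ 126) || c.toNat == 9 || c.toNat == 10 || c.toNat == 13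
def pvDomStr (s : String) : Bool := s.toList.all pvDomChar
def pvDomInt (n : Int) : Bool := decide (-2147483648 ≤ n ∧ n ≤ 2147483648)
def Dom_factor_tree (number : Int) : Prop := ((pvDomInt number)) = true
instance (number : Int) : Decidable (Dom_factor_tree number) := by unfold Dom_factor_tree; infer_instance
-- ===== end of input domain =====

-- B replaces A's linear scan of 1..n with trial division up to √n collecting divisor
-- pairs (small ascending, cofactors reversed at the end): objective 'faster' (asymptotic).

-- ===== PORT A =====
def factor_tree (number : Int) : List Int :=
  (PySem.List.pyRange 1 (number + 1) 1).foldl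
    (fun factors x =>
      if x = 1 ∨ x = number then factors                  -- 'if x in (1, number): pass'
      else if PySem.Int.mod number x = 0 then factors ++ [x]
      else factors) []

-- ===== PORT B =====
-- the 'while d * d <= number' loop of Source B, carrying the two accumulator lists
def altLoop (number d : Int) (small large : List Int) : List Int :=
  if _h : d * d ≤ number then
    if PySem.Int.mod number d = 0 then
      if PySem.Int.floordiv number d ≠ d then
        altLoop number (d + 1) (small ++ [d]) (large ++ [PySem.Int.floordiv number d])
      else
        altLoop number (d + 1) (small ++ [d]) large
    else altLoop number (d + 1) small large
  else small ++ large.reverse                             -- 'small + large[::-1]' ([::-1] = reverse)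
termination_by (number + 1 - d).toNat
decreasing_by
  all_goals
    have hdn : d ≤ number := by nlinarith [sq_nonneg (d - 1)]
    omega

def factor_tree_alt (number : Int) : List Int := altLoop number 2 [] []

-- ===== PRECONDITION & SPEC =====
def Spec_factor_tree (number : Int) (out : List Int) : Prop := out = factor_tree_alt number
instance (number : Int) (out : List Int) : Decidable (Spec_factor_tree number out) := by unfold Spec_factor_tree; infer_instance

-- ===== CLAIM (what is proved, stated in full; the proofs are below) =====
def Claim_equal_factor_tree : Prop := ∀ (number : Int), Dom_factor_tree number → Spec_factor_tree number (factor_tree number)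

-- ===== LEMMAS AND PROOFS =====

-- abbreviations for the two halves of B's result (proof-only helpers)
def smallPart (n r d : Int) : List Int :=
  (PySem.List.pyRange d (r + 1) 1).filter (fun x => decide (PySem.Int.mod n x = 0))

def largePart (n r d : Int) : List Int :=
  ((PySem.List.pyRange d (r + 1) 1).filter
      (fun x => decide (PySem.Int.mod n x = 0 ∧ PySem.Int.floordiv n x ≠ x))).map
    (fun x => PySem.Int.floordiv n x)

-- A's loop is the filter of [1, n] by the two tests
lemma loopA_eq_filter (n : Int) (l : List Int) (acc : List Int) :
    l.foldl (fun factors x =>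
      if x = 1 ∨ x = n then factors
      else if PySem.Int.mod n x = 0 then factors ++ [x]
      else factors) acc
    = acc ++ l.filter (fun x => decide (¬(x = 1 ∨ x = n) ∧ PySem.Int.mod n x = 0)) := by
  induction l generalizing acc with
  | nil => simp
  | cons y ys ih =>
      simp only [List.foldl_cons, List.filter_cons]
      by_cases h1 : y = 1 ∨ y = n
      · simp [h1, ih]
      · by_cases h2 : PySem.Int.mod n y = 0
        · simp [h1, h2, ih]
        · simp [h1, h2, ih]

-- B's loop, characterised against a fixed integer square root r
lemma altLoop_spec (n r : Int) (hr : 0 ≤ r) (h1 : r * r ≤ n) (h2 : n < (r + 1) * (r + 1)) :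
    ∀ (k : Nat) (d : Int), 1 ≤ d → (r + 1 - d).toNat = k →
      ∀ small large, altLoop n d small large
        = small ++ smallPart n r d ++ (large ++ largePart n r d).reverse := by
  intro k
  induction k with
  | zero =>
      intro d hd hk small large
      have hrd : r + 1 ≤ d := by omega
      have hcond : ¬ d * d ≤ n := by nlinarith
      rw [altLoop, dif_neg hcond]
      simp [smallPart, largePart, PySem.List.pyRange_one_eq_nil hrd]
  | succ k ih =>
      intro d hd hk small large
      have hdr : d ≤ r := by omega
      have hcond : d * d ≤ n := by nlinarith
      have hcons : PySem.List.pyRange d (r + 1) 1 = d :: PySem.List.pyRange (d + 1) (r + 1) 1 :=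
        PySem.List.pyRange_one_cons (by omega)
      rw [altLoop, dif_pos hcond]
      by_cases hmod : PySem.Int.mod n d = 0
      · by_cases hq : PySem.Int.floordiv n d ≠ d
        · rw [if_pos hmod, if_pos hq, ih (d + 1) (by omega) (by omega)]
          simp [smallPart, largePart, hcons, hmod, hq]
        · rw [if_pos hmod, if_neg hq, ih (d + 1) (by omega) (by omega)]
          simp only [ne_eq, not_not] at hq
          simp [smallPart, largePart, hcons, hmod, hq]
      · rw [if_neg hmod, ih (d + 1) (by omega) (by omega)]
        simp [smallPart, largePart, hcons, hmod]

-- a cofactor n/y of a small divisor y (with y ≠ n/y) lies strictly above the root r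
lemma cofactor_gt (n r y : Int) (hn : 1 ≤ n) (h1 : r * r ≤ n) (hy : y ∣ n)
    (h2y : 2 ≤ y) (hyr : y ≤ r) (hne : n / y ≠ y) : r < n / y := by
  have hmul : n / y * y = n := Int.ediv_mul_cancel hy
  set a := n / y with ha
  by_contra hle
  have hle : a ≤ r := not_lt.mp hle
  have ha1 : 1 ≤ a := by nlinarith
  have hnr : n = r * r := by nlinarith
  have hyr' : y = r := by nlinarith
  have har : a = r := by nlinarith
  exact hne (by omega)

-- cofactors are strictly antitone on divisors
lemma cofactor_antitone (n x y : Int) (hn : 1 ≤ n) (hx2 : 2 ≤ x) (hxy : x < y)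
    (hxd : x ∣ n) (hyd : y ∣ n) : n / y < n / x := by
  have hx := Int.ediv_mul_cancel hxd
  have hy := Int.ediv_mul_cancel hyd
  by_contra hle
  have hle : n / x ≤ n / y := not_lt.mp hle
  have hq1 : 1 ≤ n / y := by nlinarith
  nlinarith

lemma mem_smallPart (n r a : Int) :
    a ∈ smallPart n r 2 ↔ (2 ≤ a ∧ a < r + 1) ∧ a ∣ n := by
  simp [smallPart, List.mem_filter, PySem.List.mem_pyRange_one,
    PySem.Int.mod_eq_zero_iff_dvd]

lemma mem_largePart (n r a : Int) :
    a ∈ largePart n r 2 ↔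
      ∃ y, ((2 ≤ y ∧ y < r + 1) ∧ y ∣ n ∧ ¬PySem.Int.floordiv n y = y) ∧ PySem.Int.floordiv n y = a := by
  simp [largePart, List.mem_map, List.mem_filter, PySem.List.mem_pyRange_one,
    PySem.Int.mod_eq_zero_iff_dvd]

-- the heart: the ascending divisor list equals small part ++ reversed cofactors
lemma filter_eq_parts (n r : Int) (hn : 1 ≤ n) (hr : 0 ≤ r)
    (h1 : r * r ≤ n) (h2 : n < (r + 1) * (r + 1)) :
    (PySem.List.pyRange 1 (n + 1) 1).filter
        (fun x => decide (¬(x = 1 ∨ x = n) ∧ PySem.Int.mod n x = 0))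
      = smallPart n r 2 ++ (largePart n r 2).reverse := by
  have hfd : ∀ y : Int, 2 ≤ y → y ∣ n → PySem.Int.floordiv n y = n / y := by
    intro y hy _; exact PySem.Int.floordiv_eq_ediv_of_pos (by omega)
  -- membership in LHS
  have memL : ∀ a : Int, (a ∈ (PySem.List.pyRange 1 (n + 1) 1).filter
      (fun x => decide (¬(x = 1 ∨ x = n) ∧ PySem.Int.mod n x = 0))) ↔ (2 ≤ a ∧ a < n ∧ a ∣ n) := by
    intro a
    simp only [List.mem_filter, PySem.List.mem_pyRange_one, decide_eq_true_eq,
      PySem.Int.mod_eq_zero_iff_dvd, not_or]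
    constructor
    · rintro ⟨⟨hb1, hb2⟩, ⟨h3, h4⟩, h5⟩
      refine ⟨?_, ?_, h5⟩ <;> omega
    · rintro ⟨hb1, hb2, h3⟩
      exact ⟨⟨by omega, by omega⟩, ⟨by omega, by omega⟩, h3⟩
  -- pairwise (<) of both sides
  have pwL : ((PySem.List.pyRange 1 (n + 1) 1).filter
      (fun x => decide (¬(x = 1 ∨ x = n) ∧ PySem.Int.mod n x = 0))).Pairwise (· < ·) :=
    (PySem.List.pairwise_lt_pyRange_one 1 (n + 1)).filter _
  have pwS : (smallPart n r 2).Pairwise (· < ·) :=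
    (PySem.List.pairwise_lt_pyRange_one 2 (r + 1)).filter _
  have pwLg : ((largePart n r 2).reverse).Pairwise (· < ·) := by
    rw [List.pairwise_reverse]
    unfold largePart
    rw [List.pairwise_map]
    refine List.Pairwise.imp_of_mem ?_
      (((PySem.List.pairwise_lt_pyRange_one 2 (r + 1)).filter _))
    intro x y hxm hym hxy
    simp only [List.mem_filter, PySem.List.mem_pyRange_one, decide_eq_true_eq,
      PySem.Int.mod_eq_zero_iff_dvd] at hxm hym
    obtain ⟨⟨hx2, hxr⟩, hxd, -⟩ := hxm
    obtain ⟨⟨hy2, hyr⟩, hyd, -⟩ := hym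
    rw [hfd x hx2 hxd, hfd y hy2 hyd]
    exact cofactor_antitone n x y hn hx2 hxy hxd hyd
  have pwR : (smallPart n r 2 ++ (largePart n r 2).reverse).Pairwise (· < ·) := by
    rw [List.pairwise_append]
    refine ⟨pwS, pwLg, ?_⟩
    intro a ha b hb
    rw [mem_smallPart] at ha
    rw [List.mem_reverse, mem_largePart] at hb
    obtain ⟨⟨ha2, har⟩, -⟩ := ha
    obtain ⟨y, ⟨⟨hy2, hyr⟩, hyd, hyne⟩, hyb⟩ := hb
    rw [hfd y hy2 hyd] at hyb hyne
    have := cofactor_gt n r y hn h1 hyd hy2 (by omega) hyne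
    omega
  -- same membership
  have hmem : ∀ a : Int, (a ∈ (PySem.List.pyRange 1 (n + 1) 1).filter
      (fun x => decide (¬(x = 1 ∨ x = n) ∧ PySem.Int.mod n x = 0)))
      ↔ a ∈ smallPart n r 2 ++ (largePart n r 2).reverse := by
    intro a
    rw [memL, List.mem_append, mem_smallPart, List.mem_reverse, mem_largePart]
    constructor
    · rintro ⟨ha2, han, had⟩
      by_cases har : a ≤ r
      · exact Or.inl ⟨⟨ha2, by omega⟩, had⟩
      · -- a is a large divisor; its cofactor y = n/a is the witness
        have har : r < a := not_le.mp har
        refine Or.inr ⟨n / a, ⟨⟨?_, ?_⟩, ?_, ?_⟩, ?_⟩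
        · -- 2 ≤ n / a
          have hmul : n / a * a = n := Int.ediv_mul_cancel had
          have h1' : 1 ≤ n / a := by nlinarith
          have : n / a ≠ 1 := by
            intro hq; rw [hq] at hmul; omega
          omega
        · -- n / a < r + 1
          have hmul : n / a * a = n := Int.ediv_mul_cancel had
          by_contra hge
          have hge : r + 1 ≤ n / a := not_lt.mp hge
          nlinarith
        · exact ⟨a, (Int.ediv_mul_cancel had).symm⟩
        · -- floordiv n (n/a) ≠ n/a  since n/(n/a) = a > r ≥ n/a
          have hmul : n / a * a = n := Int.ediv_mul_cancel had
          have h1' : 1 ≤ n / a := by nlinarith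
          have h2' : 2 ≤ n / a := by
            have : n / a ≠ 1 := by intro hq; rw [hq] at hmul; omega
            omega
          rw [hfd (n / a) h2' ⟨a, hmul.symm⟩]
          have hback : n / (n / a) = a := by
            nth_rewrite 1 [← hmul]
            exact Int.mul_ediv_cancel_left _ (by omega)
          rw [hback]
          have hra : n / a ≤ r := by
            by_contra hge
            have hge : r < n / a := not_le.mp hge
            nlinarith
          omega
        · -- floordiv n (n/a) = a
          have hmul : n / a * a = n := Int.ediv_mul_cancel had
          have h1' : 1 ≤ n / a := by nlinarith
          have h2' : 2 ≤ n / a := by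
            have : n / a ≠ 1 := by intro hq; rw [hq] at hmul; omega
            omega
          rw [hfd (n / a) h2' ⟨a, hmul.symm⟩]
          nth_rewrite 1 [← hmul]
          exact Int.mul_ediv_cancel_left _ (by omega)
    · rintro (⟨⟨ha2, har⟩, had⟩ | ⟨y, ⟨⟨hy2, hyr⟩, hyd, hyne⟩, hya⟩)
      · -- small divisor: a < n since a*a ≤ n and 2 ≤ a
        refine ⟨ha2, ?_, had⟩
        nlinarith
      · rw [hfd y hy2 hyd] at hya hyne
        have hgt : r < n / y := cofactor_gt n r y hn h1 hyd hy2 (by omega) hyne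
        have hmul : n / y * y = n := Int.ediv_mul_cancel hyd
        have hd : a ∣ n := hya ▸ ⟨y, hmul.symm⟩
        refine ⟨by omega, ?_, hd⟩
        -- a = n/y < n since y ≥ 2
        subst hya
        nlinarith
  -- assemble
  exact List.Perm.eq_of_pairwise (fun a b _ _ h h' => le_antisymm h h')
    (pwL.imp le_of_lt) (pwR.imp le_of_lt)
    ((List.perm_ext_iff_of_nodup (pwL.imp fun h => ne_of_lt h)
      (pwR.imp fun h => ne_of_lt h)).mpr hmem)

-- ===== VERDICT (by name: the statement is the Claim_ definition above) =====
theorem factor_tree_spec : Claim_equal_factor_tree := by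
  unfold Claim_equal_factor_tree Spec_factor_tree
  intro n _
  rcases le_or_gt n 0 with hn | hn
  · -- n ≤ 0: both loops run zero times
    rw [factor_tree, PySem.List.pyRange_one_eq_nil (by omega)]
    rw [factor_tree_alt, altLoop, dif_neg (by omega : ¬(2 * 2 ≤ n))]
    simp
  · -- n ≥ 1: compare through the divisor characterisation at r = ⌊√n⌋
    have hn0 : (n.toNat : Int) = n := Int.toNat_of_nonneg (by omega)
    have hs : n.toNat.sqrt * n.toNat.sqrt ≤ n.toNat := by
      have := Nat.sqrt_le' n.toNat
      nlinarith [this]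
    have hs2 : n.toNat < (n.toNat.sqrt + 1) * (n.toNat.sqrt + 1) := by
      have := Nat.lt_succ_sqrt' n.toNat
      nlinarith [this]
    set r : Int := (n.toNat.sqrt : Int) with hrdef
    have hr : 0 ≤ r := by positivity
    have h1 : r * r ≤ n := by rw [hrdef, ← hn0]; exact_mod_cast hs
    have h2 : n < (r + 1) * (r + 1) := by rw [hrdef, ← hn0]; exact_mod_cast hs2
    rw [factor_tree, loopA_eq_filter, factor_tree_alt,
      altLoop_spec n r hr h1 h2 ((r + 1 - 2).toNat) 2 (by omega) rfl [] []]
    simp only [List.nil_append]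
    exact filter_eq_parts n r hn hr h1 h2
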